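-- pv_equiv track=rewrite | github.com/adityakumar1990/iNueron | second_lowest_grade.py | second_lowest
-- ===== SOURCE A (Python) =====
-- def second_lowest(name_list,score_list):
--     sort_score_list = list(set(score_list))
--     sort_score_list.sort()
--     second_lowest_grade = sort_score_list[1]
--     student_name = []
--     for e in name_list:
--         if e[1] == second_lowest_grade:
--             student_name.append(e[0])
--         else:
--             pass
--     student_name.sort()
--     return student_name
-- ===== SOURCE B (Python) =====
-- def second_lowest(name_list, score_list):
--     # One O(n) pass tracking the smallest and second-smallest DISTINCT scores,
--     # instead of dedupe + sort + index.
--     lo = hi = None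
--     for x in score_list:
--         if lo is None:
--             lo = x
--         elif x < lo:
--             lo, hi = x, lo
--         elif x != lo and (hi is None or x < hi):
--             hi = x
--     if hi is None:
--         raise IndexError("list index out of range")
--     return sorted(n for n, s in name_list if s == hi)
-- ===== Notes on version B (the rewrite author's own statement) =====
-- stated objective: faster
-- what changed: Replaces the dedupe-then-sort-then-index step by a single linear pass that tracks the two smallest distinct scores in two variables; the names are then collected by a comprehension and sorted.
import Mathlib
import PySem

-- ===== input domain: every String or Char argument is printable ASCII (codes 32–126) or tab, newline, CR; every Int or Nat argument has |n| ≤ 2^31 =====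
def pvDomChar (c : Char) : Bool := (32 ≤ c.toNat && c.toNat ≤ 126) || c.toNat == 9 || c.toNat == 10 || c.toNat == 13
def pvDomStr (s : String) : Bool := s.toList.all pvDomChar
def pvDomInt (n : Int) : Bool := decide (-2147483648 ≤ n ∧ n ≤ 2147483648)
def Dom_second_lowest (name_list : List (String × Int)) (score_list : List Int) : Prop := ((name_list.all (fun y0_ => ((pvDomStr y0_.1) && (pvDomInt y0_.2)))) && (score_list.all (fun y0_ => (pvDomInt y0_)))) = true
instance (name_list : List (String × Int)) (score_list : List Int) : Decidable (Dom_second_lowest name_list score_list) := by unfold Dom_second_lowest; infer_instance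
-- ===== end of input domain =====

-- B replaces A's dedupe-sort-index step by one linear pass tracking the two smallest
-- distinct scores (objective: faster on the score pass).

-- ===== PORT A =====
def second_lowest (name_list : List (String × Int)) (score_list : List Int) : List String :=
  -- sort_score_list = list(set(score_list)); sort_score_list.sort()
  let sort_score_list := PySem.List.sorted (PySem.Set.ofList score_list) (fun x => x) false
  -- second_lowest_grade = sort_score_list[1]  (IndexError excluded by Pre_)
  match PySem.List.pyGet? sort_score_list 1 with
  | none => []
  | some second_lowest_grade =>
    let student_name := name_list.foldl
      (fun acc e => if e.2 == second_lowest_grade then acc ++ [e.1] else acc) []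
    PySem.List.sorted student_name (fun s => s) false

-- ===== PORT B =====
-- the loop body of Source B: update (lo, hi), the two smallest distinct scores so far
def pvStep (st : Option Int × Option Int) (x : Int) : Option Int × Option Int :=
  match st with
  | (none, hi) => (some x, hi)
  | (some lo, none) =>
      if x < lo then (some x, some lo)
      else if x ≠ lo then (some lo, some x)
      else (some lo, none)
  | (some lo, some hi) =>
      if x < lo then (some x, some lo)
      else if x ≠ lo ∧ x < hi then (some lo, some x)
      else (some lo, some hi)

def second_lowest_alt (name_list : List (String × Int)) (score_list : List Int) : List String :=
  match (score_list.foldl pvStep (none, none)).2 with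
  | none => []   -- Source B raises IndexError here; excluded by Pre_
  | some hi =>
    PySem.List.sorted ((name_list.filter (fun e => e.2 == hi)).map (fun e => e.1)) (fun s => s) false

-- ===== PRECONDITION & SPEC =====
-- Pre_ excludes exactly the inputs with fewer than two distinct scores, on which A
-- raises IndexError (and Source B raises IndexError as well).
def Pre_second_lowest (name_list : List (String × Int)) (score_list : List Int) : Prop :=
  2 ≤ (PySem.Set.ofList score_list).length
instance (name_list : List (String × Int)) (score_list : List Int) : Decidable (Pre_second_lowest name_list score_list) := by unfold Pre_second_lowest; infer_instance

def pvWitness_second_lowest : (List (String × Int)) × List Int :=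
  ([("alice", 3), ("bob", 5), ("carl", 3)], [3, 5, 3, 7])

def Spec_second_lowest (name_list : List (String × Int)) (score_list : List Int) (out : List String) : Prop := out = second_lowest_alt name_list score_list
instance (name_list : List (String × Int)) (score_list : List Int) (out : List String) : Decidable (Spec_second_lowest name_list score_list out) := by unfold Spec_second_lowest; infer_instance

-- ===== CLAIM (what is proved, stated in full; the proofs are below) =====
def Claim_equal_second_lowest : Prop := ∀ (name_list : List (String × Int)) (score_list : List Int), Dom_second_lowest name_list score_list → Pre_second_lowest name_list score_list → Spec_second_lowest name_list score_list (second_lowest name_list score_list)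

-- ===== LEMMAS AND PROOFS =====

/-- Invariant of Source B's loop: after the seen prefix, `st` holds the smallest and
second-smallest distinct values of `seen`. -/
def pvInv (seen : List Int) (st : Option Int × Option Int) : Prop :=
  match st with
  | (none, hi) => seen = [] ∧ hi = none
  | (some lo, none) => lo ∈ seen ∧ ∀ y ∈ seen, y = lo
  | (some lo, some hi) =>
      lo ∈ seen ∧ hi ∈ seen ∧ lo < hi ∧ (∀ y ∈ seen, lo ≤ y) ∧ (∀ y ∈ seen, lo < y → hi ≤ y)

theorem pvInv_step (seen : List Int) (st : Option Int × Option Int) (x : Int)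
    (h : pvInv seen st) : pvInv (seen ++ [x]) (pvStep st x) := by
  obtain ⟨lo?, hi?⟩ := st
  cases lo? with
  | none =>
      obtain ⟨rfl, rfl⟩ := h
      simp [pvInv, pvStep]
  | some lo =>
      cases hi? with
      | none =>
          obtain ⟨hmem, hall⟩ := h
          simp only [pvStep]
          split_ifs with h1 h2
          · refine ⟨by simp, by simp [hmem], by simpa using h1, ?_, ?_⟩
            · intro y hy
              rcases List.mem_append.mp hy with hy | hy
              · have := hall y hy; omega
              · simp at hy; omega
            · intro y hy hlt
              rcases List.mem_append.mp hy with hy | hy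
              · have := hall y hy; omega
              · simp at hy; omega
          · refine ⟨by simp [hmem], by simp, by omega, ?_, ?_⟩
            · intro y hy
              rcases List.mem_append.mp hy with hy | hy
              · have := hall y hy; omega
              · simp at hy; omega
            · intro y hy hlt
              rcases List.mem_append.mp hy with hy | hy
              · have := hall y hy; omega
              · simp at hy; omega
          · have hx : x = lo := by omega
            subst hx
            refine ⟨by simp [hmem], ?_⟩
            intro y hy
            rcases List.mem_append.mp hy with hy | hy
            · exact hall y hy
            · simpa using hy
      | some hi =>
          obtain ⟨hlo, hhi, hlt, hmin, hsec⟩ := h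
          simp only [pvStep]
          split_ifs with h1 h2
          · refine ⟨by simp, by simp [hlo], by omega, ?_, ?_⟩
            · intro y hy
              rcases List.mem_append.mp hy with hy | hy
              · have := hmin y hy; omega
              · simp at hy; omega
            · intro y hy hlt'
              rcases List.mem_append.mp hy with hy | hy
              · have := hmin y hy; omega
              · simp at hy; omega
          · obtain ⟨hne, hxhi⟩ := h2
            refine ⟨by simp [hlo], by simp, by omega, ?_, ?_⟩
            · intro y hy
              rcases List.mem_append.mp hy with hy | hy
              · exact hmin y hy
              · simp at hy; omega
            · intro y hy hlt'
              rcases List.mem_append.mp hy with hy | hy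
              · have := hsec y hy hlt'; omega
              · simp at hy; omega
          · refine ⟨by simp [hlo], by simp [hhi], hlt, ?_, ?_⟩
            · intro y hy
              rcases List.mem_append.mp hy with hy | hy
              · exact hmin y hy
              · simp at hy; omega
            · intro y hy hlt'
              rcases List.mem_append.mp hy with hy | hy
              · exact hsec y hy hlt'
              · simp at hy
                subst hy
                rcases eq_or_ne y lo with rfl | hne
                · omega
                · rcases not_and_or.mp h2 with hc | hc
                  · exact absurd hne (by simpa using hc)
                  · omega

theorem pvInv_foldl (sl : List Int) : ∀ (seen : List Int) (st : Option Int × Option Int),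
    pvInv seen st → pvInv (seen ++ sl) (sl.foldl pvStep st) := by
  induction sl with
  | nil => intro seen st h; simpa using h
  | cons x t ih =>
      intro seen st h
      have := ih (seen ++ [x]) (pvStep st x) (pvInv_step seen st x h)
      simpa using this

theorem second_lowest_eq (name_list : List (String × Int)) (score_list : List Int)
    (hpre : 2 ≤ (PySem.Set.ofList score_list).length) :
    second_lowest name_list score_list = second_lowest_alt name_list score_list := by
  set S := PySem.List.sorted (PySem.Set.ofList score_list) (fun x => x) false with hS
  have hlen : 2 ≤ S.length := by
    rw [hS, PySem.List.length_sorted]; exact hpre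
  obtain ⟨s0, s1, r, hshape⟩ : ∃ s0 s1 r, S = s0 :: s1 :: r := by
    match hSm : S with
    | [] => simp at hlen
    | [a] => simp at hlen
    | a :: b :: r => exact ⟨a, b, r, rfl⟩
  have hmemS : ∀ y : Int, y ∈ S ↔ y ∈ score_list := by
    intro y
    rw [hS]; simp [PySem.List.mem_sorted, PySem.Set.mem_ofList]
  have hpair : S.Pairwise (· < ·) := by
    rw [hS]; exact PySem.List.sorted_ofList_pairwise_lt (xs := score_list)
  rw [hshape] at hpair
  have h01 : s0 < s1 := (List.pairwise_cons.mp hpair).1 s1 (by simp)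
  have hmin : ∀ y ∈ score_list, s0 ≤ y := by
    intro y hy
    have hyS : y ∈ s0 :: s1 :: r := by rw [← hshape]; exact (hmemS y).mpr hy
    rcases List.mem_cons.mp hyS with rfl | hyS
    · omega
    · have h1 := (List.pairwise_cons.mp hpair).1 y hyS
      omega
  have hsec : ∀ y ∈ score_list, s0 < y → s1 ≤ y := by
    intro y hy hlt
    have hyS : y ∈ s0 :: s1 :: r := by rw [← hshape]; exact (hmemS y).mpr hy
    rcases List.mem_cons.mp hyS with rfl | hyS
    · omega
    · rcases List.mem_cons.mp hyS with rfl | hyS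
      · omega
      · have h1 := (List.pairwise_cons.mp (List.pairwise_cons.mp hpair).2).1 y hyS
        omega
  have hs0 : s0 ∈ score_list := (hmemS s0).mp (by rw [hshape]; simp)
  have hs1 : s1 ∈ score_list := (hmemS s1).mp (by rw [hshape]; simp)
  have hinv := pvInv_foldl score_list [] (none, none) (by simp [pvInv])
  simp only [List.nil_append] at hinv
  have hfold : score_list.foldl pvStep (none, none) = (some s0, some s1) := by
    rcases hst : score_list.foldl pvStep (none, none) with ⟨lo?, hi?⟩
    rw [hst] at hinv
    cases lo? with
    | none =>
        obtain ⟨hc, -⟩ := hinv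
        rw [hc] at hs0; simp at hs0
    | some lo =>
        cases hi? with
        | none =>
            obtain ⟨hmem, hall⟩ := hinv
            have e0 := hall s0 hs0
            have e1 := hall s1 hs1
            omega
        | some hi =>
            obtain ⟨hlo, hhi, hlthi, hmin', hsec'⟩ := hinv
            have ha : s0 ≤ lo := hmin lo hlo
            have hb : lo ≤ s0 := hmin' s0 hs0
            have hlo0 : lo = s0 := by omega
            subst hlo0
            have hc : s1 ≤ hi := hsec hi hhi hlthi
            have hd : hi ≤ s1 := hsec' s1 hs1 h01
            have : hi = s1 := by omega
            subst this
            rfl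
  have hget : PySem.List.pyGet? (s0 :: s1 :: r) 1 = some s1 := by
    have := PySem.List.pyGet?_ofNat (xs := s0 :: s1 :: r) (n := 1) (by simp)
    simpa using this
  unfold second_lowest second_lowest_alt
  rw [← hS, hshape, hfold]
  simp only [hget, PySem.List.foldl_append_if, List.nil_append]

-- ===== VERDICT (by name: the statement is the Claim_ definition above) =====
theorem second_lowest_spec : Claim_equal_second_lowest := by
  intro nl sl _ hpre
  unfold Spec_second_lowest
  exact second_lowest_eq nl sl hpre
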